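-- pv_equiv track=rewrite | github.com/nbarker2021/Aletheia2 | unified/all_cqe/cqe_modules/cqe_modules__complete_system.py | _align_modulus_residues
-- ===== SOURCE A (Python) =====
-- from typing import Dict, List, Tuple, Optional, Union, Any, Set
--
-- def _align_modulus_residues(braid: List[Tuple[int, int]]) -> bool:
--     """Check modulus alignment for CRT lift."""
--     # Simplified modulus alignment check
--     moduli = [3, 5, 9, 11, 13, 17]
--
--     for mod in moduli:
--         residues_a = [pair[0] % mod for pair in braid]
--         residues_b = [pair[1] % mod for pair in braid]
--
--         # Check if residues align properly (simplified)
--         if sum(residues_a) % mod != sum(residues_b) % mod: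
--             return False
--
--     return True
-- ===== SOURCE B (Python) =====
-- from typing import List, Tuple
--
-- def _align_modulus_residues(braid: List[Tuple[int, int]]) -> bool:
--     """Check modulus alignment for CRT lift (single-pass reformulation)."""
--     diff = 0
--     for a, b in braid:
--         diff += a - b
--     return all(diff % mod == 0 for mod in [3, 5, 9, 11, 13, 17])
-- ===== Notes on version B (the rewrite author's own statement) =====
-- stated objective: simpler
-- what changed: One accumulation pass computes diff = sum(a-b); a final loop over the six fixed moduli tests diff % mod == 0, replacing A's per-modulus rebuilding of both residue lists and re-summing of the braid.
import Mathlib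
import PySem

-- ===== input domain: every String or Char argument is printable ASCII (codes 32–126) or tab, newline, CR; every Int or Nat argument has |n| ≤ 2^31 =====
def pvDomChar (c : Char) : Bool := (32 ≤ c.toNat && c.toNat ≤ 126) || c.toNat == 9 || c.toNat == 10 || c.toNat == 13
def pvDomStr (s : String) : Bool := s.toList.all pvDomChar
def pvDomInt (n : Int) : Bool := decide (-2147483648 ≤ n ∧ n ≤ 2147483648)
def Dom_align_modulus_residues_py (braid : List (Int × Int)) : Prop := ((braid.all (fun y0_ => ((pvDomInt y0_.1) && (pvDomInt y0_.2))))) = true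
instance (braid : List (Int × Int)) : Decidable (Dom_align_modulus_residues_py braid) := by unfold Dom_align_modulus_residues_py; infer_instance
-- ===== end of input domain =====

-- ===== PORT A =====
-- One honest line: B accumulates diff = sum(a-b) in a single pass, then tests the six fixed moduli (simpler).
-- A: for each modulus, build both residue lists, compare the sums mod that modulus; early return False.
def alignLoopA (braid : List (Int × Int)) : List Int → Bool
  | [] => true
  | m :: rest =>
      let residues_a := braid.map (fun pair => PySem.Int.mod pair.1 m)
      let residues_b := braid.map (fun pair => PySem.Int.mod pair.2 m)
      if PySem.Int.mod residues_a.sum m != PySem.Int.mod residues_b.sum m then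
        false
      else
        alignLoopA braid rest

def align_modulus_residues_py (braid : List (Int × Int)) : Bool :=
  alignLoopA braid [3, 5, 9, 11, 13, 17]

-- ===== PORT B =====
def align_modulus_residues_py_alt (braid : List (Int × Int)) : Bool :=
  let diff := braid.foldl (fun acc pair => acc + pair.1 - pair.2) 0
  [3, 5, 9, 11, 13, 17].all (fun m => PySem.Int.mod diff m == 0)

-- ===== PRECONDITION & SPEC =====
def Spec_align_modulus_residues_py (braid : List (Int × Int)) (out : Bool) : Prop := out = align_modulus_residues_py_alt braid
instance (braid : List (Int × Int)) (out : Bool) : Decidable (Spec_align_modulus_residues_py braid out) := by unfold Spec_align_modulus_residues_py; infer_instance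

-- ===== CLAIM (what is proved, stated in full; the proofs are below) =====
def Claim_equal_align_modulus_residues_py : Prop := ∀ (braid : List (Int × Int)), Dom_align_modulus_residues_py braid → Spec_align_modulus_residues_py braid (align_modulus_residues_py braid)

-- ===== LEMMAS AND PROOFS =====

theorem foldl_diff_eq (braid : List (Int × Int)) (init : Int) :
    braid.foldl (fun acc pair => acc + pair.1 - pair.2) init
      = init + (braid.map Prod.fst).sum - (braid.map Prod.snd).sum := by
  induction braid generalizing init with
  | nil => simp
  | cons p rest ih => simp [List.foldl_cons, ih]; ring

theorem sum_map_mod (m : Int) (hm : 0 < m) (xs : List Int) :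
    PySem.Int.mod ((xs.map (fun x => PySem.Int.mod x m)).sum) m = xs.sum % m := by
  induction xs with
  | nil => simp [PySem.Int.mod_eq_emod_of_pos hm]
  | cons x rest ih =>
      simp only [List.map_cons, List.sum_cons, PySem.Int.mod_eq_emod_of_pos hm] at *
      rw [Int.add_emod, ih, ← Int.add_emod, Int.add_emod, Int.emod_emod_of_dvd _ dvd_rfl, ← Int.add_emod]

theorem check_eq (m : Int) (hm : 0 < m) (sa sb : Int) :
    ((sa % m != sb % m) = false) ↔ ((sa - sb) % m = 0) := by
  have h1 := Int.emod_nonneg sa (by omega : m ≠ 0)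
  have h2 := Int.emod_nonneg sb (by omega : m ≠ 0)
  have h3 := Int.emod_lt_of_pos sa hm
  have h4 := Int.emod_lt_of_pos sb hm
  rw [Int.sub_emod]
  constructor
  · intro h
    have heq : sa % m = sb % m := by
      by_contra hne; simp [bne, hne] at h
    simp [heq]
  · intro h
    have hd : m ∣ (sa % m - sb % m) := Int.dvd_of_emod_eq_zero h
    obtain ⟨k, hk⟩ := hd
    have hk0 : k = 0 := by nlinarith
    rw [hk0, mul_zero] at hk
    have heq : sa % m = sb % m := by omega
    simp [heq]

theorem loop_eq (braid : List (Int × Int)) (ms : List Int) (h : ∀ m ∈ ms, 0 < m) :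
    alignLoopA braid ms
      = ms.all (fun m => PySem.Int.mod (braid.foldl (fun acc pair => acc + pair.1 - pair.2) 0) m == 0) := by
  induction ms with
  | nil => rfl
  | cons m rest ih =>
    have hm : 0 < m := h m (by simp)
    have hrest : ∀ x ∈ rest, 0 < x := fun x hx => h x (by simp [hx])
    have ha : PySem.Int.mod ((braid.map (fun pair => PySem.Int.mod pair.1 m)).sum) m
        = (braid.map Prod.fst).sum % m := by
      rw [show braid.map (fun pair => PySem.Int.mod pair.1 m)
            = (braid.map Prod.fst).map (fun x => PySem.Int.mod x m) by rw [List.map_map]; rfl]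
      exact sum_map_mod m hm _
    have hb : PySem.Int.mod ((braid.map (fun pair => PySem.Int.mod pair.2 m)).sum) m
        = (braid.map Prod.snd).sum % m := by
      rw [show braid.map (fun pair => PySem.Int.mod pair.2 m)
            = (braid.map Prod.snd).map (fun x => PySem.Int.mod x m) by rw [List.map_map]; rfl]
      exact sum_map_mod m hm _
    simp only [alignLoopA, List.all_cons, ih hrest]
    rw [ha, hb, foldl_diff_eq, PySem.Int.mod_eq_emod_of_pos hm, zero_add]
    by_cases hc : ((braid.map Prod.fst).sum - (braid.map Prod.snd).sum) % m = 0
    · have hne := (check_eq m hm (braid.map Prod.fst).sum (braid.map Prod.snd).sum).mpr hc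
      simp [hne, hc]
    · have hne : ((braid.map Prod.fst).sum % m != (braid.map Prod.snd).sum % m) = true := by
        by_contra hx
        exact hc ((check_eq m hm _ _).mp (by simpa using hx))
      simp [hne, hc]

-- ===== VERDICT (by name: the statement is the Claim_ definition above) =====
theorem align_modulus_residues_py_spec : Claim_equal_align_modulus_residues_py := by
  intro braid _
  unfold Spec_align_modulus_residues_py align_modulus_residues_py align_modulus_residues_py_alt
  exact loop_eq braid [3, 5, 9, 11, 13, 17] (by decide)
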